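-- pv_equiv track=rewrite | github.com/ams557/n2c2-RE-ADR-LUKE | SRC/utils/text_utils.py | find_BOS_index
-- ===== SOURCE A (Python) =====
-- def find_BOS_index(sentences:list[str], i:int) -> int:
--     """Find the starting index of a sentence in a text
--
--     Args:
--         sentences (list): A list of sentences (order preserved from text that it is derived from)
--         i (int): The index of the character in the text
--     Returns:
--         index of the start of sentence that the ith character is in
--     """
--     char_index = 0
--     sent_index = 0
--     for sentence in sentences:
--         rel_char_index = 0
--         for char in sentence:
--             char_index+=1
--             if char_index > i:
--                 return i - (len(sentences[sent_index][0:rel_char_index])) - 1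
--             rel_char_index+=1
--         sent_index+=1
-- ===== SOURCE B (Python) =====
-- def find_BOS_index(sentences, i):
--     """Single pass over sentence lengths instead of walking every character;
--     returns start-of-sentence index - 1, or None when no sentence contains
--     character i."""
--     if i < 0:
--         return None
--     start = 0
--     for sentence in sentences:
--         if i < start + len(sentence):
--             return start - 1
--         start += len(sentence)
--     return None
-- ===== Notes on version B (the rewrite author's own statement) =====
-- stated objective: simpler
-- what changed: B replaces A's character-by-character walk (nested loops incrementing a counter for every char up to i) with a single loop over the sentences that advances a start offset by len(sentence), one comparison per sentence.
-- intended difference: For negative i with at least one non-empty sentence A returns i-1 (leftover of its counter arithmetic firing on the first character), while B returns None, the intended answer since no character has a negative index. — e.g. on find_BOS_index(["ab"], -1): A returns some (-2), B returns none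
import Mathlib
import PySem

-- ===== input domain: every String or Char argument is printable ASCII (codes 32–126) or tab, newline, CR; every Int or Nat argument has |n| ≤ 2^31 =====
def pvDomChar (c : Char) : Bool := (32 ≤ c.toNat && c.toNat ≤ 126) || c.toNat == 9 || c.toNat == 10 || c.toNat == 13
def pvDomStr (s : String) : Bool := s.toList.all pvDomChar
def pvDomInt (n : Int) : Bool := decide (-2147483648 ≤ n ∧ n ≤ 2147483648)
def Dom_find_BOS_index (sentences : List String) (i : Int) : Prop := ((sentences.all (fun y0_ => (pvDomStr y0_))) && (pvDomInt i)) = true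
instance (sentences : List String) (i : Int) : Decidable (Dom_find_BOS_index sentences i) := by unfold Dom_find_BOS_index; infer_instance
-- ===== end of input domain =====

-- B replaces A's per-character counting loop by a single pass over the sentence lengths (simpler);
-- for negative i (where no character exists) B returns none while A returns i-1 (see D_ below).

-- ===== PORT A =====
-- inner 'for char in sentence' loop: carries char_index (ci) and rel_char_index (rel);
-- `full` is the untouched sentence, i.e. Python's sentences[sent_index] (the sentence currently
-- being iterated), used only for the slice sentences[sent_index][0:rel_char_index].
def findA_sent (full : List Char) (i : Int) : List Char → Int → Int → Sum (Option Int) Int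
  | [], ci, _ => Sum.inr ci                    -- inner loop ends without returning
  | _ :: cs, ci, rel =>
    if ci + 1 > i then
      Sum.inl (some (i - ((PySem.List.slice full (some 0) (some rel)).length : Int) - 1))
    else findA_sent full i cs (ci + 1) (rel + 1)

-- outer 'for sentence in sentences' loop, threading char_index
def findA_go (i : Int) : List String → Int → Option Int
  | [], _ => none                              -- loop ends: Python falls off and returns None
  | s :: rest, ci =>
    match findA_sent s.toList i s.toList ci 0 with
    | Sum.inl r => r
    | Sum.inr ci' => findA_go i rest ci'

def find_BOS_index (sentences : List String) (i : Int) : Option Int :=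
  findA_go i sentences 0

-- ===== PORT B =====
-- the single 'for sentence in sentences' loop of Source B, threading start
def findB_go (i : Int) : List String → Int → Option Int
  | [], _ => none
  | s :: rest, start =>
    if i < start + PySem.Str.len s then some (start - 1)
    else findB_go i rest (start + PySem.Str.len s)

def find_BOS_index_alt (sentences : List String) (i : Int) : Option Int :=
  if i < 0 then none else findB_go i sentences 0

-- ===== PRECONDITION & SPEC =====
-- For negative i with at least one non-empty sentence, A returns i-1 (its counter arithmetic fires
-- on the very first character), while B returns none — the intended answer, since no character of
-- the text has a negative index.
def D_find_BOS_index (sentences : List String) (i : Int) : Prop :=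
  i < 0 ∧ ∃ s ∈ sentences, s.toList ≠ []
instance (sentences : List String) (i : Int) : Decidable (D_find_BOS_index sentences i) := by
  unfold D_find_BOS_index; infer_instance

def Spec_find_BOS_index (sentences : List String) (i : Int) (out : Option Int) : Prop :=
  ¬ D_find_BOS_index sentences i → out = find_BOS_index_alt sentences i
instance (sentences : List String) (i : Int) (out : Option Int) : Decidable (Spec_find_BOS_index sentences i out) := by
  unfold Spec_find_BOS_index; infer_instance

def pvDiffWitness_find_BOS_index : List String × Int := (["ab"], -1)
def pvDiffWitnessOut_find_BOS_index : (Option Int) × (Option Int) := (some (-2), none)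

-- ===== CLAIM (what is proved, stated in full; the proofs are below) =====
def Claim_unchanged_find_BOS_index : Prop := ∀ (sentences : List String) (i : Int), Dom_find_BOS_index sentences i → Spec_find_BOS_index sentences i (find_BOS_index sentences i)
def Claim_changed_find_BOS_index : Prop := Dom_find_BOS_index (pvDiffWitness_find_BOS_index.1) (pvDiffWitness_find_BOS_index.2) ∧ D_find_BOS_index (pvDiffWitness_find_BOS_index.1) (pvDiffWitness_find_BOS_index.2) ∧ find_BOS_index (pvDiffWitness_find_BOS_index.1) (pvDiffWitness_find_BOS_index.2) = pvDiffWitnessOut_find_BOS_index.1 ∧ find_BOS_index_alt (pvDiffWitness_find_BOS_index.1) (pvDiffWitness_find_BOS_index.2) = pvDiffWitnessOut_find_BOS_index.2 ∧ pvDiffWitnessOut_find_BOS_index.1 ≠ pvDiffWitnessOut_find_BOS_index.2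
def Claim_exact_find_BOS_index : Prop := ∀ (sentences : List String) (i : Int), Dom_find_BOS_index sentences i → D_find_BOS_index sentences i → find_BOS_index sentences i ≠ find_BOS_index_alt sentences i

-- ===== LEMMAS AND PROOFS =====

-- A's inner loop in closed form: starting at char_index ci ≤ i with rel chars of `full` already
-- consumed, it returns some (ci - rel - 1) iff character i lies in the remaining chars cs.
lemma findA_sent_eq (full : List Char) (i : Int) :
    ∀ (cs : List Char) (ci rel : Int), 0 ≤ rel → rel.toNat + cs.length ≤ full.length → ci ≤ i →
      findA_sent full i cs ci rel =
        if i < ci + cs.length then Sum.inl (some (ci - rel - 1)) else Sum.inr (ci + cs.length) := by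
  intro cs
  induction cs with
  | nil =>
    intro ci rel _ _ hci
    simp [findA_sent]
    omega
  | cons c cs ih =>
    intro ci rel hrel hlen hci
    simp only [findA_sent]
    by_cases h : ci + 1 > i
    · have hie : i = ci := by omega
      have hsl : (PySem.List.slice full (some 0) (some rel)).length = rel.toNat := by
        rw [PySem.List.slice_zero_start, PySem.List.slice_to full hrel]
        simp at hlen ⊢
        omega
      rw [if_pos h, if_pos (by simp; omega)]
      rw [hsl]
      congr 2
      omega
    · rw [if_neg h]
      rw [ih (ci + 1) (rel + 1) (by omega) (by simp at hlen ⊢; omega) (by omega)]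
      have : ci + (c :: cs).length = (ci + 1) + cs.length := by simp; omega
      rw [this]
      split_ifs with h2
      · congr 2; omega
      · rfl

-- for nonnegative position ci ≤ i, A's outer loop computes exactly B's loop
lemma findA_go_eq_findB_go (i : Int) :
    ∀ (sents : List String) (ci : Int), ci ≤ i →
      findA_go i sents ci = findB_go i sents ci := by
  intro sents
  induction sents with
  | nil => intro ci _; rfl
  | cons s rest ih =>
    intro ci hci
    have hlen : PySem.Str.len s = (s.toList.length : Int) := by
      simp [PySem.Str.len]
    simp only [findA_go, findB_go, hlen]
    rw [findA_sent_eq s.toList i s.toList ci 0 le_rfl (by simp) hci]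
    by_cases h : i < ci + (s.toList.length : Int)
    · rw [if_pos h, if_pos h]
      show some (ci - 0 - 1) = some (ci - 1)
      norm_num
    · rw [if_neg h, if_neg h]
      exact ih (ci + s.toList.length) (by omega)

-- with all sentences empty, A's loop never returns a value
lemma findA_go_all_empty (i : Int) :
    ∀ (sents : List String) (ci : Int), (∀ s ∈ sents, s.toList = []) →
      findA_go i sents ci = none := by
  intro sents
  induction sents with
  | nil => intro ci _; rfl
  | cons s rest ih =>
    intro ci h
    have hs : s.toList = [] := h s (by simp)
    simp only [findA_go, hs, findA_sent]
    exact ih ci (fun t ht => h t (by simp [ht]))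

-- for negative i with some non-empty sentence, A fires on the first character: some (i - 1)
lemma findA_go_neg (i : Int) (hi : i < 0) :
    ∀ (sents : List String), (∃ s ∈ sents, s.toList ≠ []) →
      findA_go i sents 0 = some (i - 1) := by
  intro sents
  induction sents with
  | nil => intro h; simp at h
  | cons s rest ih =>
    intro h
    cases hs : s.toList with
    | nil =>
      simp only [findA_go, hs, findA_sent]
      apply ih
      rcases h with ⟨t, ht, hne⟩
      simp at ht
      rcases ht with ht | ht
      · exact absurd (ht ▸ hs) hne
      · exact ⟨t, ht, hne⟩
    | cons c cs =>
      simp only [findA_go, hs, findA_sent]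
      rw [if_pos (by omega)]
      simp [PySem.List.slice, PySem.List.clampIdx]

-- ===== VERDICT (by name: the statement is the Claim_ definition above) =====
theorem find_BOS_index_spec : Claim_unchanged_find_BOS_index := by
  intro sentences i _ hnD
  unfold find_BOS_index find_BOS_index_alt
  by_cases hi : i < 0
  · rw [if_pos hi]
    have hemp : ∀ s ∈ sentences, s.toList = [] := by
      intro s hs
      by_contra hne
      exact hnD ⟨hi, s, hs, hne⟩
    exact findA_go_all_empty i sentences 0 hemp
  · rw [if_neg hi]
    exact findA_go_eq_findB_go i sentences 0 (by omega)

theorem find_BOS_index_changed : Claim_changed_find_BOS_index := by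
  unfold Claim_changed_find_BOS_index; decide

theorem find_BOS_index_tight : Claim_exact_find_BOS_index := by
  intro sentences i _ hD
  rcases hD with ⟨hi, hne⟩
  unfold find_BOS_index find_BOS_index_alt
  rw [if_pos hi, findA_go_neg i hi sentences hne]
  simp
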